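-- pv_equiv track=rewrite | github.com/rriesebos/advent-of-code-2021 | calendar/day16/day16.py | parse_literal
-- ===== SOURCE A (Python) =====
-- def parse_literal(packet: str):
--     i, literal = 0, ''
--     while True:
--         nibble = packet[i+1:i+5]
--         literal += nibble
--
--         i += 5
--         if packet[i - 5] == '0':
--             break
--
--     return packet[i:], int(literal, 2)
-- ===== SOURCE B (Python) =====
-- def parse_literal(packet: str):
--     # pass 1: scan group-leading bits to find where the literal ends
--     end = 0
--     while packet[end] != '0':
--         end += 5
--     end += 5
--     # pass 2: accumulate the value arithmetically over the 4-bit payloads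
--     value = 0
--     for k in range(0, end, 5):
--         for c in packet[k + 1:k + 5]:
--             value = 2 * value + (1 if c == '1' else 0)
--     return packet[end:], value
-- ===== Notes on version B (the rewrite author's own statement) =====
-- stated objective: alternative
-- what changed: A fuses finding the terminating group, building the literal string and int(literal,2) into one loop; B first scans the group-leading bits to find the end boundary, then accumulates the value arithmetically over the 4-bit payloads, building no literal string and calling no int() parse.
-- outside the precondition, e.g. on parse_literal('01_11'): A returns ('', 7), B returns ('', 11)
import Mathlib
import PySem

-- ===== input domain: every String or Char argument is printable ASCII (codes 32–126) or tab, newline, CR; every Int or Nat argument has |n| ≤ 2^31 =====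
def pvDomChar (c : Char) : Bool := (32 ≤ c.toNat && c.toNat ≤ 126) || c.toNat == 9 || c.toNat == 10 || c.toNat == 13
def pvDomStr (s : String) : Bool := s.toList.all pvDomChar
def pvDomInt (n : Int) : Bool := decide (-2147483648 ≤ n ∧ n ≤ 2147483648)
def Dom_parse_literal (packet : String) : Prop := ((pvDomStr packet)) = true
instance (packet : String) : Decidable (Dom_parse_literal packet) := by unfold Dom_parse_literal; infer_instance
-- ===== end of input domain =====

-- B replaces A's fused accumulate-and-test loop by a boundary scan followed by an
-- arithmetic fold over the 4-bit payloads (no literal string, no int() parse): an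
-- alternative decomposition, no speed claim.

-- ===== PORT A =====
-- hand port of Python's int(s, 2): exact on nonempty strings of '0'/'1' only, which is
-- all Pre_parse_literal admits (Python additionally accepts whitespace/sign/underscores,
-- which Pre_ excludes); none = ValueError
def pvInt2? (cs : List Char) : Option Int :=
  if cs ≠ [] ∧ (∀ c ∈ cs, c = '0' ∨ c = '1') then
    some (cs.foldl (fun a c => 2 * a + (if c = '1' then 1 else 0)) 0)
  else none

-- the 'while True' loop of A; fuel = |packet| + 1 suffices under Pre_; the fuel-0 and
-- pyGet?-none (IndexError) and pvInt2?-none (ValueError) branches are unreachable under Pre_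
def pvAloop (cs : List Char) : Nat → Int → List Char → String × Int
  | 0, _, _ => ("", 0)
  | fuel + 1, i, literal =>
    let nibble := PySem.List.slice cs (some (i + 1)) (some (i + 5))
    let literal' := literal ++ nibble
    let i' := i + 5
    match PySem.List.pyGet? cs (i' - 5) with
    | none => ("", 0)
    | some c =>
      if c = '0' then
        (String.ofList (PySem.List.slice cs (some i') none), (pvInt2? literal').getD 0)
      else pvAloop cs fuel i' literal'

def parse_literal (packet : String) : String × Int :=
  pvAloop packet.toList (packet.toList.length + 1) 0 []

-- ===== PORT B =====
-- the boundary scan 'while packet[end] != '0': end += 5'; same fuel convention as A's loop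
def pvScanEnd (cs : List Char) : Nat → Int → Int
  | 0, e => e
  | fuel + 1, e =>
    match PySem.List.pyGet? cs e with
    | none => e
    | some c => if c ≠ '0' then pvScanEnd cs fuel (e + 5) else e

def parse_literal_alt (packet : String) : String × Int :=
  let cs := packet.toList
  let e := pvScanEnd cs (cs.length + 1) 0 + 5
  let value := (PySem.List.pyRange 0 e 5).foldl
    (fun v k => (PySem.List.slice cs (some (k + 1)) (some (k + 5))).foldl
      (fun v c => 2 * v + (if c = '1' then 1 else 0)) v) 0
  (String.ofList (PySem.List.slice cs (some e) none), value)

-- ===== PRECONDITION & SPEC =====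
-- Pre_ admits exactly the bit-string shape the parser consumes: a first terminating '0'
-- at some multiple-of-5 position z (no earlier one; else A IndexErrors past the string),
-- every payload character the parse reads (positions p < z+5 with p % 5 ≠ 0) a '0' or '1',
-- and length ≥ 2 (else the literal is empty and int raises ValueError). Characters after
-- position z+5, and the group-leading characters themselves, are unconstrained. This
-- excludes a few inputs A returns on — payloads where Python's int(literal,2) accepts
-- underscores/whitespace/sign, e.g. '01_11' — which are outside the function's bit-string
-- domain (see claim cites).
def Pre_parse_literal (packet : String) : Prop :=
  2 ≤ packet.toList.length ∧
  ∃ z < packet.toList.length, z % 5 = 0 ∧ packet.toList[z]? = some '0' ∧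
    (∀ m < z, m % 5 = 0 → packet.toList[m]? ≠ some '0') ∧
    (∀ p < z + 5, p < packet.toList.length → p % 5 ≠ 0 →
      (packet.toList[p]? = some '0' ∨ packet.toList[p]? = some '1'))
instance (packet : String) : Decidable (Pre_parse_literal packet) := by
  unfold Pre_parse_literal; infer_instance

def pvWitness_parse_literal : String := "01111"
def Spec_parse_literal (packet : String) (out : String × Int) : Prop := out = parse_literal_alt packet
instance (packet : String) (out : String × Int) : Decidable (Spec_parse_literal packet out) := by unfold Spec_parse_literal; infer_instance

-- ===== CLAIM (what is proved, stated in full; the proofs are below) =====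
def Claim_equal_parse_literal : Prop := ∀ (packet : String), Dom_parse_literal packet → Pre_parse_literal packet → Spec_parse_literal packet (parse_literal packet)

-- ===== LEMMAS AND PROOFS =====

def pvStep : Int → Char → Int := fun v c => 2 * v + (if c = '1' then 1 else 0)

def pvNib (cs : List Char) (k : Int) : List Char :=
  PySem.List.slice cs (some (k + 1)) (some (k + 5))

def pvCollect (cs : List Char) (i e : Int) : List Char :=
  (PySem.List.pyRange i e 5).foldl (fun a k => a ++ pvNib cs k) []

theorem pvFoldl_append_acc (cs : List Char) (rs : List Int) :
    ∀ a : List Char, rs.foldl (fun x k => x ++ pvNib cs k) a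
      = a ++ rs.foldl (fun x k => x ++ pvNib cs k) [] := by
  induction rs with
  | nil => intro a; simp
  | cons r rs ih =>
      intro a
      simp only [List.foldl_cons]
      rw [ih (a ++ pvNib cs r), ih ([] ++ pvNib cs r), List.nil_append, List.append_assoc]

theorem pvJoin (cs : List Char) (rs : List Int) :
    ∀ (a : List Char) (v : Int),
      (rs.foldl (fun x k => x ++ pvNib cs k) a).foldl pvStep v
        = rs.foldl (fun v k => (pvNib cs k).foldl pvStep v) (a.foldl pvStep v) := by
  induction rs with
  | nil => intro a v; simp
  | cons r rs ih =>
      intro a v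
      simp only [List.foldl_cons]
      rw [ih (a ++ pvNib cs r) v, List.foldl_append]

theorem pvScanEnd_ge (cs : List Char) : ∀ (fuel : Nat) (i : Int), i ≤ pvScanEnd cs fuel i := by
  intro fuel
  induction fuel with
  | zero => intro i; simp [pvScanEnd]
  | succ fuel ih =>
      intro i
      simp only [pvScanEnd]
      cases PySem.List.pyGet? cs i with
      | none => exact le_refl i
      | some c =>
          by_cases hc : c = '0'
          · simp [hc]
          · simpa [hc] using le_trans (by omega) (ih (i + 5))

theorem pvRange5_cons (a b : Int) (h : a < b) :
    PySem.List.pyRange a b 5 = a :: PySem.List.pyRange (a + 5) b 5 := by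
  rw [PySem.List.pyRange_of_pos a b (by norm_num), PySem.List.pyRange_of_pos (a+5) b (by norm_num)]
  by_cases h5 : a + 5 < b
  · rw [if_pos h, if_pos h5]
    have : ((b - a + 5 - 1) / 5).toNat = ((b - (a+5) + 5 - 1) / 5).toNat + 1 := by omega
    rw [this, List.range_succ_eq_map]
    simp only [List.map_cons, List.map_map]
    refine congrArg₂ _ (by simp) (List.map_congr_left ?_)
    intro k _
    simp [Function.comp, Nat.succ_eq_add_one]
    ring
  · rw [if_pos h, if_neg h5]
    have : ((b - a + 5 - 1) / 5).toNat = 1 := by omega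
    rw [this]
    simp

theorem pvRange5_nil (a b : Int) (h : b ≤ a) : PySem.List.pyRange a b 5 = [] := by
  rw [PySem.List.pyRange_of_pos a b (by norm_num), if_neg (by omega)]
  simp

theorem pvMemFold (cs : List Char) (rs : List Int) :
    ∀ (a : List Char) (c : Char), c ∈ rs.foldl (fun x k => x ++ pvNib cs k) a →
      c ∈ a ∨ ∃ k ∈ rs, c ∈ pvNib cs k := by
  induction rs with
  | nil => intro a c h; exact Or.inl h
  | cons r rs ih =>
      intro a c h
      rcases ih (a ++ pvNib cs r) c h with h' | ⟨k, hk, hck⟩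
      · rcases List.mem_append.mp h' with h'' | h''
        · exact Or.inl h''
        · exact Or.inr ⟨r, List.mem_cons_self, h''⟩
      · exact Or.inr ⟨k, List.mem_cons_of_mem _ hk, hck⟩

theorem pvNib_mem (cs : List Char) (k : Nat) (c : Char) (hc : c ∈ pvNib cs (k : Int)) :
    ∃ p : Nat, k < p ∧ p < k + 5 ∧ ∃ hp : p < cs.length, c = cs[p] := by
  rw [pvNib, show ((k : Int) + 1) = ((k + 1 : Nat) : Int) by push_cast; ring,
      show ((k : Int) + 5) = ((k + 5 : Nat) : Int) by push_cast; ring,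
      PySem.List.slice_natCast] at hc
  obtain ⟨n, hn, hceq⟩ := List.mem_iff_getElem.mp hc
  have hn4 : n < k + 5 - (k + 1) := lt_of_lt_of_le hn (by simp [List.length_take])
  have hlen : k + 1 + n < cs.length := by
    have := hn
    simp [List.length_take, List.length_drop] at this
    omega
  refine ⟨k + 1 + n, by omega, by omega, hlen, ?_⟩
  rw [← hceq]
  rw [List.getElem_take, List.getElem_drop]

theorem pvScanEnd_eq (cs : List Char) (z : Nat) (hzlen : z < cs.length) (hz5 : z % 5 = 0)
    (hz0 : cs[z]? = some '0') (hfirst : ∀ m < z, m % 5 = 0 → cs[m]? ≠ some '0') :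
    ∀ (fuel : Nat) (i : Nat), i % 5 = 0 → i ≤ z → z < i + 5 * fuel →
      pvScanEnd cs fuel (i : Int) = (z : Nat) := by
  intro fuel
  induction fuel with
  | zero => intro i _ _ _; omega
  | succ fuel ih =>
      intro i hi5 hiz hzf
      have hilen : i < cs.length := lt_of_le_of_lt hiz hzlen
      have hsome : cs[i]? = some (cs[i]'hilen) := List.getElem?_eq_getElem hilen
      simp only [pvScanEnd, PySem.List.pyGet?_natCast, hsome]
      by_cases hiz' : i = z
      · subst hiz'
        have : cs[i]'hilen = '0' := by
          rw [hsome] at hz0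
          exact Option.some.inj hz0
        simp [this]
      · have hne : cs[i]'hilen ≠ '0' := by
          intro h
          exact hfirst i (by omega) hi5 (by rw [hsome, h])
        rw [if_pos hne, show ((i : Int) + 5) = ((i + 5 : Nat) : Int) by push_cast; ring]
        exact ih (i + 5) (by omega) (by omega) (by omega)

theorem pvMain (cs : List Char) :
    ∀ (fuel : Nat) (i : Nat) (lit : List Char),
      i % 5 = 0 →
      (∃ j, i ≤ j ∧ j < cs.length ∧ j < i + 5 * fuel ∧ j % 5 = 0 ∧ cs[j]? = some '0') →
      pvAloop cs fuel (i : Int) lit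
        = (String.ofList (PySem.List.slice cs (some (pvScanEnd cs fuel (i : Int) + 5)) none),
           (pvInt2? (lit ++ pvCollect cs (i : Int) (pvScanEnd cs fuel (i : Int) + 5))).getD 0) := by
  intro fuel
  induction fuel with
  | zero =>
      intro i lit _ hex
      obtain ⟨j, h1, _, h3, _, _⟩ := hex
      omega
  | succ fuel ih =>
      intro i lit hi5 hex
      obtain ⟨j, hij, hjlen, hjf, hj5, hj0⟩ := hex
      have hidx : (i : Int) + 5 - 5 = (i : Int) := by ring
      have hget : PySem.List.pyGet? cs (i : Int) = cs[i]? := PySem.List.pyGet?_natCast cs i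
      have hilen : i < cs.length := lt_of_le_of_lt hij hjlen
      have hsome : cs[i]? = some (cs[i]'hilen) := List.getElem?_eq_getElem hilen
      simp only [pvAloop, pvScanEnd, hidx, hget, hsome]
      by_cases hc : cs[i]'hilen = '0'
      · -- terminating group: both loops stop at i
        rw [if_pos hc, if_neg (by simp [hc])]
        have hrange : PySem.List.pyRange (i : Int) ((i : Int) + 5) 5 = [(i : Int)] := by
          rw [pvRange5_cons _ _ (by omega), pvRange5_nil _ _ (by omega)]
        simp [pvCollect, hrange, pvNib]
      · -- this group's leading bit is not '0': both loops advance by 5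
        have hex' : ∃ j', (i + 5) ≤ j' ∧ j' < cs.length ∧ j' < (i + 5) + 5 * fuel ∧ j' % 5 = 0 ∧ cs[j']? = some '0' := by
          refine ⟨j, ?_, hjlen, by omega, hj5, hj0⟩
          have hne : j ≠ i := by
            intro h
            subst h
            rw [hsome] at hj0
            exact hc (Option.some.inj hj0)
          omega
        have hcast : (i : Int) + 5 = ((i + 5 : Nat) : Int) := by push_cast; ring
        rw [if_neg hc, if_pos hc, hcast]
        rw [ih (i + 5) (lit ++ PySem.List.slice cs (some ((i : Int) + 1)) (some ((i + 5 : Nat) : Int))) (by omega) hex']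
        have hE : ((i + 5 : Nat) : Int) ≤ pvScanEnd cs fuel ((i + 5 : Nat) : Int) := pvScanEnd_ge cs fuel _
        have hcollect : pvCollect cs (i : Int) (pvScanEnd cs fuel ((i + 5 : Nat) : Int) + 5)
            = pvNib cs (i : Int) ++ pvCollect cs ((i + 5 : Nat) : Int) (pvScanEnd cs fuel ((i + 5 : Nat) : Int) + 5) := by
          rw [pvCollect, pvRange5_cons (i : Int) _ (by push_cast at hE ⊢; omega), List.foldl_cons, List.nil_append,
              pvFoldl_append_acc, hcast]
          rfl
        rw [hcollect, pvNib, hcast, ← List.append_assoc]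

-- ===== VERDICT (by name: the statement is the Claim_ definition above) =====
theorem pvNib_zero_ne_nil (cs : List Char) (hlen : 2 ≤ cs.length) : pvNib cs 0 ≠ [] := by
  rw [pvNib]
  rw [PySem.List.slice_toNat _ (by norm_num) (by norm_num)]
  intro h
  have := congrArg List.length h
  simp at this
  omega

theorem parse_literal_spec : Claim_equal_parse_literal := by
  intro packet _ pre
  obtain ⟨hlen, z, hzlen, hz5, hz0, hfirst, hpay⟩ := pre
  have h := pvMain packet.toList (packet.toList.length + 1) 0 []
    (by omega) ⟨z, by omega, hzlen, by omega, hz5, hz0⟩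
  simp only [Nat.cast_zero] at h
  have hEz : pvScanEnd packet.toList (packet.toList.length + 1) 0 = (z : Int) := by
    have := pvScanEnd_eq packet.toList z hzlen hz5 hz0 hfirst (packet.toList.length + 1) 0
      (by omega) (by omega) (by omega)
    simpa using this
  unfold Spec_parse_literal parse_literal parse_literal_alt
  rw [h]
  refine congrArg₂ Prod.mk (by rw [hEz]) ?_
  set cs := packet.toList with hcs
  rw [hEz]
  set L := pvCollect cs 0 ((z : Int) + 5) with hL
  have hLsplit : L = pvNib cs 0 ++ pvCollect cs (0 + 5) ((z : Int) + 5) := by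
    rw [hL, pvCollect, pvRange5_cons 0 ((z : Int) + 5) (by omega), List.foldl_cons,
        List.nil_append, pvFoldl_append_acc]
    rfl
  have hLne : L ≠ [] := by
    rw [hLsplit]
    intro hcontra
    exact pvNib_zero_ne_nil cs hlen (List.append_eq_nil_iff.mp hcontra).1
  have hLbin : ∀ c ∈ L, c = '0' ∨ c = '1' := by
    intro c hc
    rcases pvMemFold cs (PySem.List.pyRange 0 ((z : Int) + 5) 5) [] c hc with h' | ⟨k, hkmem, hknib⟩
    · simp at h'
    · obtain ⟨hk0, hkz, hkdvd⟩ := (PySem.List.mem_pyRange_iff_of_pos (by norm_num) k).mp hkmem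
      have hknat : k = ((k.toNat : Nat) : Int) := by omega
      rw [hknat] at hknib
      obtain ⟨p, hp1, hp2, hplen, hpc⟩ := pvNib_mem cs k.toNat c hknib
      have hk5 : k.toNat % 5 = 0 := by omega
      have hpz : p < z + 5 := by omega
      have hp5 : p % 5 ≠ 0 := by omega
      have := hpay p hpz hplen hp5
      rw [List.getElem?_eq_getElem hplen] at this
      rcases this with h' | h'
      · exact Or.inl (by rw [hpc]; exact Option.some.inj h')
      · exact Or.inr (by rw [hpc]; exact Option.some.inj h')
  have hInt : pvInt2? L = some (L.foldl pvStep 0) := by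
    rw [pvInt2?, if_pos ⟨hLne, hLbin⟩]
    rfl
  rw [List.nil_append, hInt]
  have hjoin := pvJoin cs (PySem.List.pyRange 0 ((z : Int) + 5) 5) [] 0
  simp only [List.foldl_nil] at hjoin
  rw [Option.getD_some]
  rw [show List.foldl (fun x k => x ++ pvNib cs k) [] (PySem.List.pyRange 0 ((z : Int) + 5) 5) = L from rfl] at hjoin
  rw [hjoin]
  rfl
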